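-- pv_equiv track=rewrite | github.com/Kutcher1945/EternalSwordValuableMentor | cameras_snapshot.py | extract_module_info
-- ===== SOURCE A (Python) =====
-- def extract_module_info(video_analytics):
--     if video_analytics is None:
--         return {
--             "is_ao": False,
--             "is_fr": False,
--             "is_lpr": False,
--             "is_sa": False,
--             "is_tp": False
--         }
--     modules = video_analytics.get("modules", [])
--     module_info = {
--         "is_ao": False,
--         "is_fr": False,
--         "is_lpr": False,
--         "is_sa": False,
--         "is_tp": False
--     }
--     for module in modules:
--         module_name = module.get("module")
--         if module_name == "AbandonedObjectsModule":
--             module_info["is_ao"] = True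
--         elif module_name == "FaceRecognitionModule":
--             module_info["is_fr"] = True
--         elif module_name == "LicensePlateRecognitionModule":
--             module_info["is_lpr"] = True
--         elif module_name == "SituationAnalyticsModule":
--             module_info["is_sa"] = True
--         elif module_name == "TamperingModule":
--             module_info["is_tp"] = True
--     return module_info
-- ===== SOURCE B (Python) =====
-- FLAG_MODULES = [
--     ("is_ao", "AbandonedObjectsModule"),
--     ("is_fr", "FaceRecognitionModule"),
--     ("is_lpr", "LicensePlateRecognitionModule"),
--     ("is_sa", "SituationAnalyticsModule"),
--     ("is_tp", "TamperingModule"),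
-- ]
--
--
-- def extract_module_info(video_analytics):
--     modules = [] if video_analytics is None else video_analytics.get("modules", [])
--     return {flag: any(m.get("module") == name for m in modules)
--             for flag, name in FLAG_MODULES}
-- ===== Notes on version B (the rewrite author's own statement) =====
-- stated objective: simpler
-- what changed: Replaces A's single pass with a five-way if/elif branching over a mutated flags dict by a data-driven table of (flag, module-name) pairs, computing each flag independently with its own any() scan over the modules (five staged passes, no mutation, no branching).
import Mathlib
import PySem

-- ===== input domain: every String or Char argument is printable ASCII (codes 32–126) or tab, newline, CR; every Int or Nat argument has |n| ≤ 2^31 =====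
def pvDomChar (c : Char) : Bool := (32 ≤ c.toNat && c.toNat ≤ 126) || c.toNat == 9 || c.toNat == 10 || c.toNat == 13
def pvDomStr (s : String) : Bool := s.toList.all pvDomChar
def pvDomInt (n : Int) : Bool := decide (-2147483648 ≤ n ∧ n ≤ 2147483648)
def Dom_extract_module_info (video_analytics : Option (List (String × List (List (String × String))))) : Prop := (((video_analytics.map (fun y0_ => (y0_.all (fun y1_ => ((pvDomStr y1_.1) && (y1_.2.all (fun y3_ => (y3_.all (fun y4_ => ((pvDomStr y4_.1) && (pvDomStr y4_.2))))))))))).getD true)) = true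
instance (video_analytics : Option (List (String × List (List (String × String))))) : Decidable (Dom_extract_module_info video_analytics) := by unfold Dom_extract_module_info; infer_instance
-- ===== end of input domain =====

-- B replaces A's single branching pass over a mutated flags dict by a data-driven
-- table of (flag, module-name) pairs with one independent any-scan per flag
-- (objective: simpler).


-- ===== PORT A =====
-- the loop body of A (the five-way if/elif dict assignment), named for the fold
def pvStepA (mi : PySem.Dict String Bool) (module : List (String × String)) : PySem.Dict String Bool :=
  let module_name := (PySem.Dict.mk module).get? "module"
  if module_name = some "AbandonedObjectsModule" then mi.insert "is_ao" true
  else if module_name = some "FaceRecognitionModule" then mi.insert "is_fr" true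
  else if module_name = some "LicensePlateRecognitionModule" then mi.insert "is_lpr" true
  else if module_name = some "SituationAnalyticsModule" then mi.insert "is_sa" true
  else if module_name = some "TamperingModule" then mi.insert "is_tp" true
  else mi

-- literal transliteration of A: early return on None, then a fold over the
-- modules list mutating the flags dict via Dict.insert (overwrite in place)
def extract_module_info (video_analytics : Option (List (String × List (List (String × String))))) : List (String × Bool) :=
  match video_analytics with
  | none =>
      [("is_ao", false), ("is_fr", false), ("is_lpr", false), ("is_sa", false), ("is_tp", false)]
  | some va =>
      let modules := (PySem.Dict.mk va).getD "modules" []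
      let module_info : PySem.Dict String Bool :=
        PySem.Dict.mk [("is_ao", false), ("is_fr", false), ("is_lpr", false), ("is_sa", false), ("is_tp", false)]
      let final := modules.foldl pvStepA module_info
      final.items

-- ===== PORT B =====
-- the data table of (flag key, module name) pairs (FLAG_MODULES in Source B)
def pvFlagTable : List (String × String) :=
  [("is_ao", "AbandonedObjectsModule"),
   ("is_fr", "FaceRecognitionModule"),
   ("is_lpr", "LicensePlateRecognitionModule"),
   ("is_sa", "SituationAnalyticsModule"),
   ("is_tp", "TamperingModule")]

-- literal transliteration of B: for each table row, one independent any-scan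
def extract_module_info_alt (video_analytics : Option (List (String × List (List (String × String))))) : List (String × Bool) :=
  let modules := match video_analytics with
    | none => []
    | some va => (PySem.Dict.mk va).getD "modules" []
  pvFlagTable.map (fun fn =>
    (fn.1, modules.any (fun m => (PySem.Dict.mk m).get? "module" == some fn.2)))

-- ===== PRECONDITION & SPEC =====
def Spec_extract_module_info (video_analytics : Option (List (String × List (List (String × String))))) (out : List (String × Bool)) : Prop := out = extract_module_info_alt video_analytics
instance (video_analytics : Option (List (String × List (List (String × String))))) (out : List (String × Bool)) : Decidable (Spec_extract_module_info video_analytics out) := by unfold Spec_extract_module_info; infer_instance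

-- ===== CLAIM =====
def Claim_equal_extract_module_info : Prop := ∀ (video_analytics : Option (List (String × List (List (String × String))))), Dom_extract_module_info video_analytics → Spec_extract_module_info video_analytics (extract_module_info video_analytics)

-- ===== LEMMAS AND PROOFS =====

-- A's loop invariant: folding pvStepA over the modules ORs each flag with the
-- result of B's per-flag any-scan over the same modules
set_option maxHeartbeats 2000000 in
theorem loop_invariant (ms : List (List (String × String))) :
    ∀ (a b c d e : Bool),
    (ms.foldl pvStepA
      (PySem.Dict.mk [("is_ao", a), ("is_fr", b), ("is_lpr", c), ("is_sa", d), ("is_tp", e)])).items =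
    [("is_ao", a || ms.any (fun m => (PySem.Dict.mk m).get? "module" == some "AbandonedObjectsModule")),
     ("is_fr", b || ms.any (fun m => (PySem.Dict.mk m).get? "module" == some "FaceRecognitionModule")),
     ("is_lpr", c || ms.any (fun m => (PySem.Dict.mk m).get? "module" == some "LicensePlateRecognitionModule")),
     ("is_sa", d || ms.any (fun m => (PySem.Dict.mk m).get? "module" == some "SituationAnalyticsModule")),
     ("is_tp", e || ms.any (fun m => (PySem.Dict.mk m).get? "module" == some "TamperingModule"))] := by
  induction ms with
  | nil => intro a b c d e; simp
  | cons m rest ih =>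
      intro a b c d e
      simp only [List.foldl_cons, List.any_cons]
      rcases hname : (PySem.Dict.mk m).get? "module" with _ | nm
      · rw [show pvStepA (PySem.Dict.mk [("is_ao", a), ("is_fr", b), ("is_lpr", c), ("is_sa", d), ("is_tp", e)]) m = PySem.Dict.mk [("is_ao", a), ("is_fr", b), ("is_lpr", c), ("is_sa", d), ("is_tp", e)] from by simp [pvStepA, hname], ih]
        simp [hname]
      · by_cases hA : nm = "AbandonedObjectsModule"
        · subst hA
          rw [show pvStepA (PySem.Dict.mk [("is_ao", a), ("is_fr", b), ("is_lpr", c), ("is_sa", d), ("is_tp", e)]) m = PySem.Dict.mk [("is_ao", true), ("is_fr", b), ("is_lpr", c), ("is_sa", d), ("is_tp", e)] from by simp [pvStepA, hname, PySem.Dict.insert, PySem.Dict.contains], ih]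
          simp [hname]
        · by_cases hB : nm = "FaceRecognitionModule"
          · subst hB
            rw [show pvStepA (PySem.Dict.mk [("is_ao", a), ("is_fr", b), ("is_lpr", c), ("is_sa", d), ("is_tp", e)]) m = PySem.Dict.mk [("is_ao", a), ("is_fr", true), ("is_lpr", c), ("is_sa", d), ("is_tp", e)] from by simp [pvStepA, hname, PySem.Dict.insert, PySem.Dict.contains], ih]
            simp [hname]
          · by_cases hC : nm = "LicensePlateRecognitionModule"
            · subst hC
              rw [show pvStepA (PySem.Dict.mk [("is_ao", a), ("is_fr", b), ("is_lpr", c), ("is_sa", d), ("is_tp", e)]) m = PySem.Dict.mk [("is_ao", a), ("is_fr", b), ("is_lpr", true), ("is_sa", d), ("is_tp", e)] from by simp [pvStepA, hname, PySem.Dict.insert, PySem.Dict.contains], ih]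
              simp [hname]
            · by_cases hD : nm = "SituationAnalyticsModule"
              · subst hD
                rw [show pvStepA (PySem.Dict.mk [("is_ao", a), ("is_fr", b), ("is_lpr", c), ("is_sa", d), ("is_tp", e)]) m = PySem.Dict.mk [("is_ao", a), ("is_fr", b), ("is_lpr", c), ("is_sa", true), ("is_tp", e)] from by simp [pvStepA, hname, PySem.Dict.insert, PySem.Dict.contains], ih]
                simp [hname]
              · by_cases hE : nm = "TamperingModule"
                · subst hE
                  rw [show pvStepA (PySem.Dict.mk [("is_ao", a), ("is_fr", b), ("is_lpr", c), ("is_sa", d), ("is_tp", e)]) m = PySem.Dict.mk [("is_ao", a), ("is_fr", b), ("is_lpr", c), ("is_sa", d), ("is_tp", true)] from by simp [pvStepA, hname, PySem.Dict.insert, PySem.Dict.contains], ih]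
                  simp [hname]
                · rw [show pvStepA (PySem.Dict.mk [("is_ao", a), ("is_fr", b), ("is_lpr", c), ("is_sa", d), ("is_tp", e)]) m = PySem.Dict.mk [("is_ao", a), ("is_fr", b), ("is_lpr", c), ("is_sa", d), ("is_tp", e)] from by simp [pvStepA, hname, hA, hB, hC, hD, hE], ih]
                  simp [hname, beq_eq_false_iff_ne.mpr hA, beq_eq_false_iff_ne.mpr hB, beq_eq_false_iff_ne.mpr hC, beq_eq_false_iff_ne.mpr hD, beq_eq_false_iff_ne.mpr hE]

-- ===== VERDICT =====
theorem extract_module_info_spec : Claim_equal_extract_module_info := by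
  intro va _
  unfold Spec_extract_module_info extract_module_info extract_module_info_alt
  cases va with
  | none => simp [pvFlagTable]
  | some d => simp [loop_invariant, pvFlagTable]
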